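-- pv_equiv track=rewrite | github.com/noobrs/ai-recruitment-app | api/pdf/entity_extraction.py | find_first_occurring_string
-- ===== SOURCE A (Python) =====
-- from typing import List, Optional
--
-- def find_first_occurring_string(full_text: str, string_list: List[str]) -> str:
--     first_string = None
--     min_index = len(full_text) # Start with a max index value
--
--     for search_str in string_list:
--         index = full_text.find(search_str)
--
--         # If the string is found (index != -1) AND it's earlier than what we found so far
--         if index != -1 and index < min_index:
--             min_index = index
--             first_string = search_str
--
--     return first_string
-- ===== SOURCE B (Python) =====
-- from typing import List, Optional
--
-- def find_first_occurring_string(full_text: str, string_list: List[str]) -> str: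
--     # Scan the text left to right; at the first position where any listed
--     # string starts, return the first such string in list order.
--     for i in range(len(full_text)):
--         for s in string_list:
--             if full_text.startswith(s, i):
--                 return s
--     return None
-- ===== Notes on version B (the rewrite author's own statement) =====
-- stated objective: alternative
-- what changed: A runs str.find once per pattern and folds a (best, min_index) pair over the pattern list; B scans the text position by position and returns the first listed string that starts at the earliest position, so no per-pattern find or minimum bookkeeping is needed.
import Mathlib
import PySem

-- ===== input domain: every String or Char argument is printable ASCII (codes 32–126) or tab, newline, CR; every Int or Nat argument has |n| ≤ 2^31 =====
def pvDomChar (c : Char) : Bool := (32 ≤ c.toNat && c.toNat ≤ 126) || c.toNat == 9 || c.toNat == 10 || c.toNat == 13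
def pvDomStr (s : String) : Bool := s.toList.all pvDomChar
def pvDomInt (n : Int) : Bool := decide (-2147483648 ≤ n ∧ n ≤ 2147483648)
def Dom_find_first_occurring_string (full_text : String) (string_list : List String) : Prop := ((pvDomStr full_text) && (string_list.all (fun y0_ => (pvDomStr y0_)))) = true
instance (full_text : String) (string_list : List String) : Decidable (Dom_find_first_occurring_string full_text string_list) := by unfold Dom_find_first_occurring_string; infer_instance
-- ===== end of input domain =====

-- B scans the text position by position instead of running find per pattern: an alternative
-- traversal (same cost class), structurally different from A's per-pattern minimum fold.

-- ===== PORT A =====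
-- A: fold over the pattern list keeping (first_string, min_index), init min_index = len(full_text).
def find_first_occurring_string (full_text : String) (string_list : List String) : Option String :=
  (string_list.foldl
    (fun st search_str =>
      let index := PySem.Str.find full_text search_str
      if index ≠ -1 ∧ index < st.2 then (some search_str, index) else st)
    ((none : Option String), PySem.Str.len full_text)).1

-- ===== PORT B =====
-- B's outer loop 'for i in range(len(full_text))' with 'full_text.startswith(s, i)' is the
-- recursion on the suffix full_text[i:]; the inner loop returning the first matching s is find?.
def scanAlt : List Char → List String → Option String
  | [], _ => none
  | c :: rest, lst =>
    match lst.find? (fun s => PySem.Chars.startswith (c :: rest) s.toList) with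
    | some s => some s
    | none => scanAlt rest lst

def find_first_occurring_string_alt (full_text : String) (string_list : List String) : Option String :=
  scanAlt full_text.toList string_list

-- ===== PRECONDITION & SPEC =====
def Spec_find_first_occurring_string (full_text : String) (string_list : List String) (out : Option String) : Prop := out = find_first_occurring_string_alt full_text string_list
instance (full_text : String) (string_list : List String) (out : Option String) : Decidable (Spec_find_first_occurring_string full_text string_list out) := by unfold Spec_find_first_occurring_string; infer_instance

-- ===== CLAIM (what is proved, stated in full; the proofs are below) =====
def Claim_equal_find_first_occurring_string : Prop := ∀ (full_text : String) (string_list : List String), Dom_find_first_occurring_string full_text string_list → Spec_find_first_occurring_string full_text string_list (find_first_occurring_string full_text string_list)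

-- ===== LEMMAS AND PROOFS =====

-- f p = full_text.find(p), the quantity A's fold compares
def pvF (F : List Char) (p : String) : Int := PySem.Chars.find F p.toList

def pvStep (F : List Char) (st : Option String × Int) (p : String) : Option String × Int :=
  if pvF F p ≠ -1 ∧ pvF F p < st.2 then (some p, pvF F p) else st

-- the second component of A's fold on its own
def pvMin (F : List Char) (m : Int) (lst : List String) : Int :=
  lst.foldl (fun m p => if pvF F p ≠ -1 ∧ pvF F p < m then pvF F p else m) m

lemma portA_eq (s : String) (lst : List String) :
    find_first_occurring_string s lst
      = (lst.foldl (pvStep s.toList) ((none : Option String), (s.toList.length : Int))).1 := by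
  unfold find_first_occurring_string pvStep pvF
  simp [PySem.Str.len, PySem.Str.find]

lemma portB_eq (s : String) (lst : List String) :
    find_first_occurring_string_alt s lst = scanAlt s.toList lst := rfl

lemma pvMin_le (F : List Char) : ∀ (lst : List String) (m : Int), pvMin F m lst ≤ m := by
  intro lst
  induction lst with
  | nil => intro m; simp [pvMin]
  | cons p t ih =>
    intro m
    show pvMin F (if pvF F p ≠ -1 ∧ pvF F p < m then pvF F p else m) t ≤ m
    split_ifs with h
    · exact le_trans (ih _) (le_of_lt h.2)
    · exact ih m

lemma pvMin_cases (F : List Char) : ∀ (lst : List String) (m : Int),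
    pvMin F m lst = m ∨ ∃ p ∈ lst, pvF F p = pvMin F m lst ∧ 0 ≤ pvMin F m lst := by
  intro lst
  induction lst with
  | nil => intro m; left; simp [pvMin]
  | cons p t ih =>
    intro m
    have hmin : pvMin F m (p :: t) = pvMin F (if pvF F p ≠ -1 ∧ pvF F p < m then pvF F p else m) t := rfl
    rw [hmin]
    split_ifs with h
    · right
      rcases ih (pvF F p) with h1 | ⟨q, hq, h2, h3⟩
      · exact ⟨p, by simp, by rw [h1], by
          rw [h1]; have := PySem.Chars.neg_one_le_find F p.toList
          have h0 := h.1; unfold pvF at *; omega⟩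
      · exact ⟨q, by simp [hq], h2, h3⟩
    · rcases ih m with h1 | ⟨q, hq, h2, h3⟩
      · left; exact h1
      · right; exact ⟨q, by simp [hq], h2, h3⟩

lemma pvMin_min (F : List Char) : ∀ (lst : List String) (m : Int) (p : String), p ∈ lst →
    pvF F p ≠ -1 → pvF F p < m → pvMin F m lst ≤ pvF F p := by
  intro lst
  induction lst with
  | nil => intro m p hp; simp at hp
  | cons q t ih =>
    intro m p hp hne hlt
    rcases List.mem_cons.1 hp with rfl | hp'
    · show pvMin F (if pvF F p ≠ -1 ∧ pvF F p < m then pvF F p else m) t ≤ pvF F p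
      rw [if_pos ⟨hne, hlt⟩]; exact pvMin_le F t _
    · show pvMin F (if pvF F q ≠ -1 ∧ pvF F q < m then pvF F q else m) t ≤ pvF F p
      split_ifs with h
      · by_cases hlt2 : pvF F p < pvF F q
        · exact ih _ p hp' hne hlt2
        · exact le_trans (pvMin_le F t _) (by omega)
      · exact ih m p hp' hne hlt

lemma fold_fst (F : List Char) : ∀ (lst : List String) (st : Option String × Int),
    (lst.foldl (pvStep F) st).1 =
      if pvMin F st.2 lst = st.2 then st.1
      else lst.find? (fun p => pvF F p == pvMin F st.2 lst) := by
  intro lst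
  induction lst with
  | nil => intro st; simp [pvMin]
  | cons p t ih =>
    intro st
    by_cases h : pvF F p ≠ -1 ∧ pvF F p < st.2
    · have hstep : pvStep F st p = (some p, pvF F p) := by unfold pvStep; rw [if_pos h]
      have hmin : pvMin F st.2 (p :: t) = pvMin F (pvF F p) t := by
        show pvMin F (if pvF F p ≠ -1 ∧ pvF F p < st.2 then pvF F p else st.2) t = _
        rw [if_pos h]
      rw [List.foldl_cons, hstep, ih, hmin]
      dsimp only
      have hle : pvMin F (pvF F p) t ≤ pvF F p := pvMin_le F t _
      have hne : ¬ (pvMin F (pvF F p) t = st.2) := by omega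
      rw [if_neg hne]
      by_cases he : pvMin F (pvF F p) t = pvF F p
      · rw [if_pos he]
        rw [List.find?_cons_of_pos (by simp [he])]
      · rw [if_neg he]
        rw [List.find?_cons_of_neg (by simp; omega)]
    · have hstep : pvStep F st p = st := by unfold pvStep; rw [if_neg h]
      have hmin : pvMin F st.2 (p :: t) = pvMin F st.2 t := by
        show pvMin F (if pvF F p ≠ -1 ∧ pvF F p < st.2 then pvF F p else st.2) t = _
        rw [if_neg h]
      rw [List.foldl_cons, hstep, ih, hmin]
      by_cases he : pvMin F st.2 t = st.2
      · rw [if_pos he, if_pos he]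
      · rw [if_neg he, if_neg he]
        have hqual : ∃ q ∈ t, pvF F q = pvMin F st.2 t ∧ 0 ≤ pvMin F st.2 t := by
          rcases pvMin_cases F t st.2 with h1 | h1
          · exact absurd h1 he
          · exact h1
        have hlt : pvMin F st.2 t < st.2 := lt_of_le_of_ne (pvMin_le F t _) he
        have hpne : ¬ (pvF F p = pvMin F st.2 t) := by
          intro hc
          rcases hqual with ⟨q, _, _, h0⟩
          exact h ⟨by omega, by omega⟩
        rw [List.find?_cons_of_neg (by simp [hpne])]

lemma find_le_of_prefix_drop (F p : List Char) (k : Nat) (h : p <+: F.drop k) :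
    0 ≤ PySem.Chars.find F p ∧ PySem.Chars.find F p ≤ (k : Int) := by
  have h0 : 0 ≤ PySem.Chars.find F p := by
    rw [PySem.Chars.find_nonneg_iff]
    rw [← PySem.Chars.isIn_iff_infix, ← PySem.Chars.exists_prefix_drop_iff_isIn]
    exact ⟨k, h⟩
  refine ⟨h0, ?_⟩
  have hs := (PySem.Chars.find_spec h0).2
  by_contra hc
  exact hs k (by omega) h

lemma scan_none : ∀ (F : List Char) (lst : List String),
    (∀ k, k < F.length → ∀ p ∈ lst, ¬ (p.toList <+: F.drop k)) → scanAlt F lst = none := by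
  intro F
  induction F with
  | nil => intro lst _; rfl
  | cons c rest ih =>
    intro lst h
    have hhead : lst.find? (fun s => PySem.Chars.startswith (c :: rest) s.toList) = none := by
      rw [List.find?_eq_none]
      intro p hp
      simp only [PySem.Chars.startswith_iff]
      exact h 0 (by simp) p hp
    show (match lst.find? (fun s => PySem.Chars.startswith (c :: rest) s.toList) with
      | some s => some s
      | none => scanAlt rest lst) = none
    rw [hhead]
    exact ih lst (fun k hk p hp => h (k + 1) (by simpa using hk) p hp)

lemma scan_some : ∀ (F : List Char) (lst : List String) (k : Nat) (r : String),
    k < F.length →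
    (∀ j, j < k → ∀ q ∈ lst, ¬ (q.toList <+: F.drop j)) →
    lst.find? (fun q => PySem.Chars.startswith (F.drop k) q.toList) = some r →
    scanAlt F lst = some r := by
  intro F
  induction F with
  | nil => intro lst k r hk; simp at hk
  | cons c rest ih =>
    intro lst k r hk hj hfind
    show (match lst.find? (fun s => PySem.Chars.startswith (c :: rest) s.toList) with
      | some s => some s
      | none => scanAlt rest lst) = some r
    cases k with
    | zero =>
      rw [show (c :: rest).drop 0 = c :: rest from rfl] at hfind
      rw [hfind]
    | succ k' =>
      have hhead : lst.find? (fun s => PySem.Chars.startswith (c :: rest) s.toList) = none := by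
        rw [List.find?_eq_none]
        intro q hq
        simp only [PySem.Chars.startswith_iff]
        exact hj 0 (Nat.succ_pos _) q hq
      rw [hhead]
      exact ih lst k' r (by simpa using hk)
        (fun j hjlt q hq => hj (j + 1) (by omega) q hq) hfind

lemma pv_find?_congr {α : Type} (p q : α → Bool) : ∀ (l : List α),
    (∀ x ∈ l, p x = q x) → l.find? p = l.find? q := by
  intro l
  induction l with
  | nil => intro _; rfl
  | cons x t ih =>
    intro h
    rw [List.find?_cons, List.find?_cons, h x (by simp), ih (fun y hy => h y (by simp [hy]))]

-- ===== VERDICT (by name: the statement is the Claim_ definition above) =====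
theorem find_first_occurring_string_spec : Claim_equal_find_first_occurring_string := by
  intro s lst _
  unfold Spec_find_first_occurring_string
  rw [portA_eq, portB_eq]
  rw [fold_fst]
  set F := s.toList with hF
  set m' := pvMin F ((F.length : Int)) lst with hm'
  by_cases h : m' = (F.length : Int)
  · rw [if_pos h]
    symm
    apply scan_none
    intro k hk p hp hpre
    obtain ⟨h0, hle⟩ := find_le_of_prefix_drop F p.toList k hpre
    have hmin := pvMin_min F lst ((F.length : Int)) p hp (by unfold pvF; omega)
      (by unfold pvF; omega)
    unfold pvF at hmin
    omega
  · rw [if_neg h]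
    have hlt : m' < (F.length : Int) := lt_of_le_of_ne (pvMin_le F lst _) h
    obtain ⟨p₀, hp₀, hfp₀, h0⟩ : ∃ p ∈ lst, pvF F p = m' ∧ 0 ≤ m' := by
      rcases pvMin_cases F lst ((F.length : Int)) with h1 | h1
      · exact absurd h1 h
      · exact h1
    -- the two find? predicates agree on members of lst
    have hcongr : lst.find? (fun q => pvF F q == m')
        = lst.find? (fun q => PySem.Chars.startswith (F.drop m'.toNat) q.toList) := by
      apply pv_find?_congr
      intro q hq
      rw [Bool.eq_iff_iff]
      simp only [beq_iff_eq, PySem.Chars.startswith_iff]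
      constructor
      · intro he
        have hnn : 0 ≤ PySem.Chars.find F q.toList := by unfold pvF at he; omega
        have := (PySem.Chars.find_spec hnn).1
        unfold pvF at he
        rw [he] at this
        exact this
      · intro hpre
        obtain ⟨hq0, hqle⟩ := find_le_of_prefix_drop F q.toList m'.toNat hpre
        have hmin := pvMin_min F lst ((F.length : Int)) q hq (by unfold pvF; omega)
          (by unfold pvF; omega)
        unfold pvF
        unfold pvF at hmin
        omega
    have hsome : ∃ r, lst.find? (fun q => pvF F q == m') = some r := by
      have : (lst.find? (fun q => pvF F q == m')).isSome := by
        rw [List.find?_isSome]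
        exact ⟨p₀, hp₀, by simp [hfp₀]⟩
      exact Option.isSome_iff_exists.1 this
    obtain ⟨r, hr⟩ := hsome
    rw [hr]
    symm
    apply scan_some F lst m'.toNat r (by omega)
    · intro j hjlt q hq hpre
      obtain ⟨hq0, hqle⟩ := find_le_of_prefix_drop F q.toList j hpre
      have hmin := pvMin_min F lst ((F.length : Int)) q hq (by unfold pvF; omega)
        (by unfold pvF; omega)
      unfold pvF at hmin
      omega
    · rw [← hcongr]
      exact hr
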